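-- pv_equiv track=rewrite | github.com/Arkanoid01/Auryga | frequentItemSet.py | polish
-- ===== SOURCE A (Python) =====
-- def polish(rawList,parentsList):
--     polishedList = []
--     for elems in rawList:
--         for elem in list(elems):
--             if(not elem in polishedList):
--                 polishedList.append(elem)
--
--     for elem in parentsList:
--         if(elem in polishedList):
--             polishedList.remove(elem)
--
--     return polishedList
-- ===== SOURCE B (Python) =====
-- def polish(rawList, parentsList):
--     parents = set(parentsList)
--     seen = set()
--     polished = []
--     for elems in rawList:
--         for elem in elems:
--             if elem not in seen and elem not in parents:
--                 seen.add(elem)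
--                 polished.append(elem)
--     return polished
-- ===== Notes on version B (the rewrite author's own statement) =====
-- stated objective: faster
-- what changed: Single fused pass with hash-set membership (seen/parents sets) builds the result directly, replacing A's quadratic dedup-by-list-scan followed by a second pass that list.remove's each parent.
import Mathlib
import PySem

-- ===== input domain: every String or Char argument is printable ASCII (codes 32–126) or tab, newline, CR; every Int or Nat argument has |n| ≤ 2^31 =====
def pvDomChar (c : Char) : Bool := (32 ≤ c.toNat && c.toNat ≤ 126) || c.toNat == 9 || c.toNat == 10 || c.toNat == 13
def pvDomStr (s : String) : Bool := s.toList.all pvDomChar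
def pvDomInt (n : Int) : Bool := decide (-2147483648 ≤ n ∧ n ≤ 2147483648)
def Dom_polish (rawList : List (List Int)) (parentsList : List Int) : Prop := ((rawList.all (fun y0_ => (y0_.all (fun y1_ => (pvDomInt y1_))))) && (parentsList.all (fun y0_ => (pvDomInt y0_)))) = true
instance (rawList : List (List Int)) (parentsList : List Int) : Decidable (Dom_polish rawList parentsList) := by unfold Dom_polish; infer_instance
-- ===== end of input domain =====

-- B fuses A's two passes into one hash-set-backed pass; the equivalence below says the returned lists are equal.

-- ===== PORT A =====
-- dedup into polishedList by linear scan, then list.remove each parent present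
def polish (rawList : List (List Int)) (parentsList : List Int) : List Int :=
  let polished := rawList.foldl (fun acc elems =>
      elems.foldl (fun acc e => if e ∈ acc then acc else acc ++ [e]) acc) []
  parentsList.foldl (fun acc e =>
      if e ∈ acc then (PySem.List.remove? acc e).getD acc else acc) polished

-- ===== PORT B =====
-- single pass: append elem iff not yet seen and not a parent; 'seen' and 'parents' are Python sets
def polish_alt (rawList : List (List Int)) (parentsList : List Int) : List Int :=
  let parents : PySem.Set Int := PySem.Set.ofList parentsList
  let st := rawList.foldl (fun (st : PySem.Set Int × List Int) elems =>
      elems.foldl (fun st e =>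
        if ¬ PySem.Set.contains st.1 e ∧ ¬ PySem.Set.contains parents e
        then (PySem.Set.add st.1 e, st.2 ++ [e]) else st) st)
    (PySem.Set.empty, [])
  st.2

-- ===== PRECONDITION & SPEC =====
def Spec_polish (rawList : List (List Int)) (parentsList : List Int) (out : List Int) : Prop := out = polish_alt rawList parentsList
instance (rawList : List (List Int)) (parentsList : List Int) (out : List Int) : Decidable (Spec_polish rawList parentsList out) := by unfold Spec_polish; infer_instance

-- ===== CLAIM (what is proved, stated in full; the proofs are below) =====
def Claim_equal_polish : Prop := ∀ (rawList : List (List Int)) (parentsList : List Int), Dom_polish rawList parentsList → Spec_polish rawList parentsList (polish rawList parentsList)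

-- ===== LEMMAS AND PROOFS =====

-- phase 1 of A keeps the accumulator duplicate-free
lemma nodup_dedupFold : ∀ (xs : List Int) (acc : List Int), acc.Nodup →
    (xs.foldl (fun acc e => if e ∈ acc then acc else acc ++ [e]) acc).Nodup := by
  intro xs
  induction xs with
  | nil => intro acc h; simpa using h
  | cons x xs ih =>
    intro acc h
    simp only [List.foldl_cons]
    by_cases hx : x ∈ acc
    · simpa [hx] using ih acc h
    · refine ih _ ?_
      rw [if_neg hx, List.nodup_append]
      refine ⟨h, List.nodup_singleton x, ?_⟩
      intro a ha b hb
      have hb' : b = x := by simpa using hb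
      subst hb'
      exact fun he => hx (he ▸ ha)

-- A's second pass on a duplicate-free list is a filter by non-membership in parentsList
lemma removeFold_eq_filter : ∀ (ps : List Int) (acc : List Int), acc.Nodup →
    ps.foldl (fun acc e => if e ∈ acc then (PySem.List.remove? acc e).getD acc else acc) acc
      = acc.filter (fun e => decide (e ∉ ps)) := by
  intro ps
  induction ps with
  | nil => intro acc _; simp
  | cons p ps ih =>
    intro acc h
    simp only [List.foldl_cons]
    by_cases hp : p ∈ acc
    · rw [if_pos hp, PySem.List.remove?_eq_some_erase acc p hp, Option.getD_some,
        ih (acc.erase p) (h.erase p), h.erase_eq_filter p, List.filter_filter]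
      apply List.filter_congr
      intro a _
      by_cases hap : a = p <;> simp [hap]
    · rw [if_neg hp, ih acc h]
      apply List.filter_congr
      intro a ha
      have : a ≠ p := fun he => hp (he ▸ ha)
      simp [this]

-- B's fused pass computes the filtered version of A's phase-1 accumulator
lemma fuse (P : List Int) : ∀ (xs : List Int) (seen : PySem.Set Int) (acc : List Int),
    (∀ e : Int, e ∈ seen ↔ e ∈ acc ∧ e ∉ P) →
    (xs.foldl (fun (st : PySem.Set Int × List Int) e =>
        if ¬ PySem.Set.contains st.1 e ∧ ¬ PySem.Set.contains (PySem.Set.ofList P) e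
        then (PySem.Set.add st.1 e, st.2 ++ [e]) else st)
      (seen, acc.filter (fun e => decide (e ∉ P)))).2
    = (xs.foldl (fun acc e => if e ∈ acc then acc else acc ++ [e]) acc).filter
        (fun e => decide (e ∉ P)) := by
  intro xs
  induction xs with
  | nil => intro seen acc _; simp
  | cons x xs ih =>
    intro seen acc hinv
    simp only [List.foldl_cons]
    have hseen : PySem.Set.contains seen x = true ↔ (x ∈ acc ∧ x ∉ P) := by
      simp [PySem.Set.contains, hinv x]
    have hpar : PySem.Set.contains (PySem.Set.ofList P) x = true ↔ x ∈ P := by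
      simp [PySem.Set.contains, PySem.Set.mem_ofList]
    by_cases hxP : x ∈ P
    · -- parent: B skips; A may append x, but the filter drops it either way
      rw [if_neg (by simp [hxP])]
      by_cases hxa : x ∈ acc
      · rw [if_pos hxa]; exact ih seen acc hinv
      · rw [if_neg hxa]
        have : acc.filter (fun e => decide (e ∉ P))
            = (acc ++ [x]).filter (fun e => decide (e ∉ P)) := by
          simp [List.filter_append, hxP]
        rw [this]
        apply ih
        intro e
        rw [hinv e]
        constructor
        · rintro ⟨he, hp⟩; exact ⟨by simp [he], hp⟩
        · rintro ⟨he, hp⟩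
          rcases List.mem_append.mp he with h | h
          · exact ⟨h, hp⟩
          · simp at h; exact absurd hxP (h ▸ hp)
    · by_cases hxa : x ∈ acc
      · -- already seen: both sides skip
        have hx : PySem.Set.contains seen x = true := hseen.mpr ⟨hxa, hxP⟩
        rw [if_neg (by simp; exact fun h => absurd ((hinv x).mpr ⟨hxa, hxP⟩) h), if_pos hxa]
        exact ih seen acc hinv
      · -- new non-parent: both sides append
        have hx' : ¬ PySem.Set.contains seen x = true := by
          rw [hseen]; rintro ⟨h, _⟩; exact hxa h
        rw [if_pos ⟨hx', by rw [hpar]; exact hxP⟩, if_neg hxa]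
        have h2 : (acc.filter (fun e => decide (e ∉ P))) ++ [x]
            = (acc ++ [x]).filter (fun e => decide (e ∉ P)) := by
          simp [List.filter_append, hxP]
        have hs : PySem.Set.add seen x = seen ++ [x] := by
          simp only [PySem.Set.add, if_neg hx']
        simp only [h2]
        rw [hs]
        apply ih
        intro e
        constructor
        · intro he
          rcases List.mem_append.mp he with h | h
          · rcases (hinv e).mp h with ⟨h1, h2⟩
            exact ⟨by simp [h1], h2⟩
          · simp at h; subst h; exact ⟨by simp, hxP⟩
        · rintro ⟨he, hp⟩
          rcases List.mem_append.mp he with h | h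
          · exact List.mem_append.mpr (.inl ((hinv e).mpr ⟨h, hp⟩))
          · simp at h; subst h; simp

-- ===== VERDICT (by name: the statement is the Claim_ definition above) =====
theorem polish_spec : Claim_equal_polish := by
  intro rawList parentsList _
  show polish rawList parentsList = polish_alt rawList parentsList
  have hA : polish rawList parentsList
      = parentsList.foldl (fun acc e => if e ∈ acc then (PySem.List.remove? acc e).getD acc else acc)
          (rawList.flatten.foldl (fun acc e => if e ∈ acc then acc else acc ++ [e]) []) := by
    show parentsList.foldl _ (rawList.foldl (fun acc elems =>
        elems.foldl (fun acc e => if e ∈ acc then acc else acc ++ [e]) acc) []) = _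
    rw [List.foldl_flatten]
  have hB : polish_alt rawList parentsList
      = (rawList.flatten.foldl (fun (st : PySem.Set Int × List Int) e =>
          if ¬ PySem.Set.contains st.1 e ∧ ¬ PySem.Set.contains (PySem.Set.ofList parentsList) e
          then (PySem.Set.add st.1 e, st.2 ++ [e]) else st) (PySem.Set.empty, [])).2 := by
    show (rawList.foldl _ (PySem.Set.empty, ([] : List Int))).2 = _
    rw [List.foldl_flatten]
  rw [hA, hB,
    removeFold_eq_filter parentsList _ (nodup_dedupFold rawList.flatten [] (by simp)),
    ← fuse parentsList rawList.flatten PySem.Set.empty [] (by simp [PySem.Set.empty])]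
  simp
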